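-- pv_equiv track=rewrite | github.com/ominiverdi/osgeo_wiki_bot | mcp_server/handlers/template_search.py | format_results_for_answer
-- ===== SOURCE A (Python) =====
-- from typing import Dict, Any, Optional, List
--
-- def format_results_for_answer(results: List[Dict], action: str) -> str:
--     """Format DB results for the answer generation prompt."""
--     if not results:
--         return "No results found"
--
--     lines = []
--     for i, r in enumerate(results[:5], 1):
--         if 'predicate' in r:  # Graph result
--             subj = r.get('subject', '')
--             pred = r.get('predicate', '')
--             obj = r.get('object', '')
--             url = r.get('source_page_url', '')
--             lines.append(f"{i}. {subj} --{pred}--> {obj}")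
--             if url:
--                 lines.append(f"   Source: {url}")
--         elif 'resume' in r:  # Semantic result
--             title = r.get('page_title', '')
--             resume = r.get('resume', '')[:300]
--             url = r.get('wiki_url', '')
--             lines.append(f"{i}. {title}: {resume}")
--             if url:
--                 lines.append(f"   URL: {url}")
--         elif 'chunk_text' in r:  # Fulltext result
--             title = r.get('title', '')
--             text = r.get('chunk_text', '')[:300]
--             url = r.get('url', '')
--             lines.append(f"{i}. {title}: {text}")
--             if url:
--                 lines.append(f"   URL: {url}")
--         else:  # Title result
--             title = r.get('page_title', '')
--             preview = r.get('resume_preview', '')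
--             url = r.get('wiki_url', '')
--             lines.append(f"{i}. {title}: {preview}")
--             if url:
--                 lines.append(f"   URL: {url}")
--
--     return "\n".join(lines)
-- ===== SOURCE B (Python) =====
-- def format_results_for_answer(results, action):
--     """Format DB results for the answer generation prompt (recursive, direct string build)."""
--     if not results:
--         return "No results found"
--
--     def block(i, r):
--         g = r.get
--         if 'predicate' in r:
--             head, url, tag = (f"{g('subject', '')} --{g('predicate', '')}--> {g('object', '')}",
--                               g('source_page_url', ''), 'Source')
--         elif 'resume' in r:
--             head, url, tag = (f"{g('page_title', '')}: {g('resume', '')[:300]}",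
--                               g('wiki_url', ''), 'URL')
--         elif 'chunk_text' in r:
--             head, url, tag = (f"{g('title', '')}: {g('chunk_text', '')[:300]}",
--                               g('url', ''), 'URL')
--         else:
--             head, url, tag = (f"{g('page_title', '')}: {g('resume_preview', '')}",
--                               g('wiki_url', ''), 'URL')
--         return f"{i}. {head}" + (f"\n   {tag}: {url}" if url else "")
--
--     def go(rs, i):
--         if not rs or i > 5:
--             return ""
--         rest = go(rs[1:], i + 1)
--         b = block(i, rs[0])
--         return b + "\n" + rest if rest else b
--
--     return go(results, 1)
-- ===== Notes on version B (the rewrite author's own statement) =====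
-- stated objective: alternative
-- what changed: Replaces A's imperative loop that accumulates a flat list of lines and joins it at the end by a recursive descent over the result list that builds the final string directly: each record is rendered as one self-contained block (head plus embedded newline-prefixed URL line) and blocks are concatenated with a separator during the recursion, with the five-result cap enforced by the recursion counter instead of slicing.
import Mathlib
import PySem

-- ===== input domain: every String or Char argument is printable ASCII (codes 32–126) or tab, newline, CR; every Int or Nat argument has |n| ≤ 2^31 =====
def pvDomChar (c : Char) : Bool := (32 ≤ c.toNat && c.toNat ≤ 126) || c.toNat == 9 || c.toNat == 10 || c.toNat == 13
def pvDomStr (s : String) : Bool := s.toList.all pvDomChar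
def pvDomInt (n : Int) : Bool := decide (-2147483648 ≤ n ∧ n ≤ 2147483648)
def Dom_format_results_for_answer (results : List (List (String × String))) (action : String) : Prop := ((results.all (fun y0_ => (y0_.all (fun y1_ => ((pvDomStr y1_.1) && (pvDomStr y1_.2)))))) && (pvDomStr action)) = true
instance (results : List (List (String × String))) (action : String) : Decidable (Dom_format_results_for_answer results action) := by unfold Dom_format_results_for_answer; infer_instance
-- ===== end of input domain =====

-- B replaces A's accumulate-lines-then-join loop by a recursive descent that renders each
-- record as one self-contained block and concatenates the blocks directly; same cost,
-- different decomposition (alternative).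

-- shared dict primitives (Python's `k in r` and `r.get(k, '')` on a dict)
def pvDhas (r : List (String × String)) (k : String) : Bool :=
  (PySem.Dict.mk r).contains k
def pvDget (r : List (String × String)) (k : String) : String :=
  (PySem.Dict.mk r).getD k ""

-- ===== PORT A =====
def format_results_for_answer (results : List (List (String × String))) (action : String) : String :=
  if results = [] then "No results found"
  else
    let lines : List String :=
      (PySem.List.enumerate (PySem.List.slice results none (some 5)) 1).foldl
        (fun lines ir =>
          let i := ir.1
          let r := ir.2
          if pvDhas r "predicate" then
            let subj := pvDget r "subject"
            let pred := pvDget r "predicate"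
            let obj := pvDget r "object"
            let url := pvDget r "source_page_url"
            let lines := lines ++ [PySem.Int.toStr i ++ ". " ++ subj ++ " --" ++ pred ++ "--> " ++ obj]
            if url ≠ "" then lines ++ ["   Source: " ++ url] else lines
          else if pvDhas r "resume" then
            let title := pvDget r "page_title"
            let resume := PySem.Str.slice (pvDget r "resume") none (some 300)
            let url := pvDget r "wiki_url"
            let lines := lines ++ [PySem.Int.toStr i ++ ". " ++ title ++ ": " ++ resume]
            if url ≠ "" then lines ++ ["   URL: " ++ url] else lines
          else if pvDhas r "chunk_text" then
            let title := pvDget r "title"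
            let text := PySem.Str.slice (pvDget r "chunk_text") none (some 300)
            let url := pvDget r "url"
            let lines := lines ++ [PySem.Int.toStr i ++ ". " ++ title ++ ": " ++ text]
            if url ≠ "" then lines ++ ["   URL: " ++ url] else lines
          else
            let title := pvDget r "page_title"
            let preview := pvDget r "resume_preview"
            let url := pvDget r "wiki_url"
            let lines := lines ++ [PySem.Int.toStr i ++ ". " ++ title ++ ": " ++ preview]
            if url ≠ "" then lines ++ ["   URL: " ++ url] else lines) []
    PySem.Str.join "\n" lines

-- ===== PORT B =====
-- Source B's `block(i, r)`: head, url and tag from the matching branch, then one block string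
def pvBlock (i : Int) (r : List (String × String)) : String :=
  let hut : String × String × String :=
    if pvDhas r "predicate" then
      (pvDget r "subject" ++ " --" ++ pvDget r "predicate" ++ "--> " ++ pvDget r "object",
       pvDget r "source_page_url", "Source")
    else if pvDhas r "resume" then
      (pvDget r "page_title" ++ ": " ++ PySem.Str.slice (pvDget r "resume") none (some 300),
       pvDget r "wiki_url", "URL")
    else if pvDhas r "chunk_text" then
      (pvDget r "title" ++ ": " ++ PySem.Str.slice (pvDget r "chunk_text") none (some 300),
       pvDget r "url", "URL")
    else
      (pvDget r "page_title" ++ ": " ++ pvDget r "resume_preview",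
       pvDget r "wiki_url", "URL")
  PySem.Int.toStr i ++ ". " ++ hut.1 ++
    (if hut.2.1 ≠ "" then "\n   " ++ hut.2.2 ++ ": " ++ hut.2.1 else "")

-- Source B's `go(rs, i)`: recursive descent, cap enforced by the counter
def pvGo : List (List (String × String)) → Int → String
  | [], _ => ""
  | r :: rs, i =>
    if 5 < i then ""
    else
      let rest := pvGo rs (i + 1)
      let b := pvBlock i r
      if rest ≠ "" then b ++ "\n" ++ rest else b

def format_results_for_answer_alt (results : List (List (String × String))) (action : String) : String :=
  if results = [] then "No results found"
  else pvGo results 1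

-- ===== PRECONDITION & SPEC =====
def Spec_format_results_for_answer (results : List (List (String × String))) (action : String) (out : String) : Prop := out = format_results_for_answer_alt results action
instance (results : List (List (String × String))) (action : String) (out : String) : Decidable (Spec_format_results_for_answer results action out) := by unfold Spec_format_results_for_answer; infer_instance

-- ===== CLAIM =====
def Claim_equal_format_results_for_answer : Prop := ∀ (results : List (List (String × String))) (action : String), Dom_format_results_for_answer results action → Spec_format_results_for_answer results action (format_results_for_answer results action)

-- ===== LEMMAS AND PROOFS =====

-- the one or two lines A's loop appends for one record (proof-side characterisation)
def pvLinesA (i : Int) (r : List (String × String)) : List String :=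
  if pvDhas r "predicate" then
    let head := PySem.Int.toStr i ++ ". " ++ pvDget r "subject" ++ " --" ++ pvDget r "predicate" ++ "--> " ++ pvDget r "object"
    let url := pvDget r "source_page_url"
    if url ≠ "" then [head, "   Source: " ++ url] else [head]
  else if pvDhas r "resume" then
    let head := PySem.Int.toStr i ++ ". " ++ pvDget r "page_title" ++ ": " ++ PySem.Str.slice (pvDget r "resume") none (some 300)
    let url := pvDget r "wiki_url"
    if url ≠ "" then [head, "   URL: " ++ url] else [head]
  else if pvDhas r "chunk_text" then
    let head := PySem.Int.toStr i ++ ". " ++ pvDget r "title" ++ ": " ++ PySem.Str.slice (pvDget r "chunk_text") none (some 300)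
    let url := pvDget r "url"
    if url ≠ "" then [head, "   URL: " ++ url] else [head]
  else
    let head := PySem.Int.toStr i ++ ". " ++ pvDget r "page_title" ++ ": " ++ pvDget r "resume_preview"
    let url := pvDget r "wiki_url"
    if url ≠ "" then [head, "   URL: " ++ url] else [head]

-- A's foldl over the enumerated prefix is the flatMap of pvLinesA
theorem pvFoldl_eq (l : List (Int × List (String × String))) (acc : List String) :
    l.foldl
      (fun lines ir =>
        let i := ir.1
        let r := ir.2
        if pvDhas r "predicate" then
          let subj := pvDget r "subject"
          let pred := pvDget r "predicate"
          let obj := pvDget r "object"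
          let url := pvDget r "source_page_url"
          let lines := lines ++ [PySem.Int.toStr i ++ ". " ++ subj ++ " --" ++ pred ++ "--> " ++ obj]
          if url ≠ "" then lines ++ ["   Source: " ++ url] else lines
        else if pvDhas r "resume" then
          let title := pvDget r "page_title"
          let resume := PySem.Str.slice (pvDget r "resume") none (some 300)
          let url := pvDget r "wiki_url"
          let lines := lines ++ [PySem.Int.toStr i ++ ". " ++ title ++ ": " ++ resume]
          if url ≠ "" then lines ++ ["   URL: " ++ url] else lines
        else if pvDhas r "chunk_text" then
          let title := pvDget r "title"
          let text := PySem.Str.slice (pvDget r "chunk_text") none (some 300)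
          let url := pvDget r "url"
          let lines := lines ++ [PySem.Int.toStr i ++ ". " ++ title ++ ": " ++ text]
          if url ≠ "" then lines ++ ["   URL: " ++ url] else lines
        else
          let title := pvDget r "page_title"
          let preview := pvDget r "resume_preview"
          let url := pvDget r "wiki_url"
          let lines := lines ++ [PySem.Int.toStr i ++ ". " ++ title ++ ": " ++ preview]
          if url ≠ "" then lines ++ ["   URL: " ++ url] else lines) acc
      = acc ++ l.flatMap (fun ir => pvLinesA ir.1 ir.2) := by
  induction l generalizing acc with
  | nil => simp
  | cons x xs ih =>
      simp only [List.foldl_cons, List.flatMap_cons, ih]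
      rw [← List.append_assoc]
      congr 1
      simp only [pvLinesA]
      split_ifs <;> simp_all

-- joining with "\n"
theorem strJoin_singleton (s : String) : PySem.Str.join "\n" [s] = s := by
  rw [← String.toList_inj]
  simp [PySem.Str.toList_join, PySem.Chars.join_singleton]

theorem strJoin_cons_cons (s t : String) (rest : List String) :
    PySem.Str.join "\n" (s :: t :: rest) = s ++ "\n" ++ PySem.Str.join "\n" (t :: rest) := by
  rw [← String.toList_inj]
  simp [PySem.Str.toList_join, PySem.Chars.join_cons_cons, String.toList_append]

theorem strJoin_append (l1 l2 : List String) (h1 : l1 ≠ []) (h2 : l2 ≠ []) :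
    PySem.Str.join "\n" (l1 ++ l2) = PySem.Str.join "\n" l1 ++ "\n" ++ PySem.Str.join "\n" l2 := by
  induction l1 with
  | nil => exact absurd rfl h1
  | cons x xs ih =>
      cases xs with
      | nil =>
          cases l2 with
          | nil => exact absurd rfl h2
          | cons y ys => simp [strJoin_cons_cons, strJoin_singleton]
      | cons y ys =>
          have := ih (by simp)
          simp only [List.cons_append] at *
          rw [strJoin_cons_cons, this, strJoin_cons_cons]
          simp [String.append_assoc]

-- a join whose first line is nonempty is nonempty
theorem strJoin_ne_empty (x : String) (xs : List String) (hx : x ≠ "") :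
    PySem.Str.join "\n" (x :: xs) ≠ "" := by
  cases xs with
  | nil => rw [strJoin_singleton]; exact hx
  | cons y ys =>
      rw [strJoin_cons_cons]
      intro h
      rw [← String.toList_inj] at h
      simp [String.toList_append] at h

-- every pvLinesA is head :: tail with a nonempty head
theorem pvLinesA_shape (i : Int) (r : List (String × String)) :
    ∃ x xs, pvLinesA i r = x :: xs ∧ x ≠ "" := by
  simp only [pvLinesA]
  split_ifs <;>
    (refine ⟨_, _, rfl, ?_⟩
     intro hh
     rw [← String.toList_inj] at hh
     simp [String.toList_append] at hh)

theorem pvBlock_eq (i : Int) (r : List (String × String)) :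
    pvBlock i r = PySem.Str.join "\n" (pvLinesA i r) := by
  simp only [pvBlock, pvLinesA]
  split_ifs <;>
    (simp [strJoin_singleton, strJoin_cons_cons, String.append_assoc]
     try (rw [← String.append_assoc]; congr 1))

-- the recursion pvGo computes the join over the capped, enumerated prefix
theorem pvGo_eq (rs : List (List (String × String))) :
    ∀ (n : Nat) (i : Int), i + n = 6 → 1 ≤ i →
      PySem.Str.join "\n" ((PySem.List.enumerate (rs.take n) i).flatMap (fun ir => pvLinesA ir.1 ir.2))
        = pvGo rs i := by
  induction rs with
  | nil =>
      intro n i _ _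
      simp [pvGo, PySem.List.enumerate_nil]
      decide
  | cons r rs ih =>
      intro n i h6 h1
      cases n with
      | zero =>
          have : (5 : Int) < i := by omega
          simp [pvGo, this, PySem.List.enumerate_nil]
          decide
      | succ m =>
          have hle : ¬ (5 : Int) < i := by omega
          rw [List.take_succ_cons, PySem.List.enumerate_cons, List.flatMap_cons]
          have ihm := ih m (i + 1) (by omega) (by omega)
          simp only [pvGo, hle, if_false]
          obtain ⟨x, xs, hshape, hx⟩ := pvLinesA_shape i r
          cases hrest : (PySem.List.enumerate (rs.take m) (i + 1)).flatMap (fun ir => pvLinesA ir.1 ir.2) with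
          | nil =>
              rw [hrest] at ihm
              have hrests : pvGo rs (i + 1) = "" := by
                rw [← ihm]; decide
              simp [hrests, pvBlock_eq]
          | cons y ys =>
              rw [hrest] at ihm
              have hy : y ≠ "" := by
                cases hm : rs.take m with
                | nil => rw [hm] at hrest; simp [PySem.List.enumerate_nil] at hrest
                | cons e es =>
                    rw [hm, PySem.List.enumerate_cons, List.flatMap_cons] at hrest
                    obtain ⟨x', xs', hs', hx'⟩ := pvLinesA_shape (i + 1) e
                    rw [hs'] at hrest
                    simp at hrest
                    rw [← hrest.1]; exact hx'
              have hrests : pvGo rs (i + 1) ≠ "" := by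
                rw [← ihm]; exact strJoin_ne_empty y ys hy
              rw [strJoin_append _ _ (by rw [hshape]; simp) (by simp), ihm]
              simp [hrests, pvBlock_eq]

-- ===== VERDICT =====
theorem format_results_for_answer_spec : Claim_equal_format_results_for_answer := by
  intro results action _
  unfold Spec_format_results_for_answer format_results_for_answer format_results_for_answer_alt
  by_cases h : results = []
  · simp [h]
  · simp only [if_neg h]
    rw [pvFoldl_eq]
    simp only [List.nil_append]
    have h5 : PySem.List.slice results none (some 5) = results.take 5 := by
      have := PySem.List.slice_to_natCast (xs := results) (b := 5)
      simpa using this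
    rw [h5]
    exact pvGo_eq results 5 1 (by omega) (by omega)
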